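-- pv_equiv track=rewrite | github.com/BGSU-RNA/RNA-Structure-utils | rnastructure/util/correlator.py | columns_to_index
-- ===== SOURCE A (Python) =====
-- def columns_to_index(sequence, names=None):
--     size = len(sequence) - sequence.count('-')
--     if names == None:
--         names = range(size)
--
--     if len(names) != size:
--         raise ValueError("Must give as many names as non gap characters")
--
--     correlations = {}
--     current = 0
--     for column, char in enumerate(sequence):
--         if char != '-':
--             correlations[column] = names[current]
--             current += 1
--     return correlations
-- ===== SOURCE B (Python) =====
-- def columns_to_index(sequence, names=None):
--     size = len(sequence) - sequence.count('-')
--     if names is None: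
--         names = range(size)
--     if len(names) != size:
--         raise ValueError("Must give as many names as non gap characters")
--     correlations = {}
--     column = 0
--     for name in names:
--         while sequence[column] == '-':
--             column += 1
--         correlations[column] = name
--         column += 1
--     return correlations
-- ===== Notes on version B (the rewrite author's own statement) =====
-- stated objective: alternative
-- what changed: Inverts the control flow: instead of enumerating the sequence and threading a counter into names, B loops over the names themselves and advances a column pointer with an inner while-loop that skips gap characters, so the sequence is indexed on demand (trailing gaps are never visited).
import Mathlib
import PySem

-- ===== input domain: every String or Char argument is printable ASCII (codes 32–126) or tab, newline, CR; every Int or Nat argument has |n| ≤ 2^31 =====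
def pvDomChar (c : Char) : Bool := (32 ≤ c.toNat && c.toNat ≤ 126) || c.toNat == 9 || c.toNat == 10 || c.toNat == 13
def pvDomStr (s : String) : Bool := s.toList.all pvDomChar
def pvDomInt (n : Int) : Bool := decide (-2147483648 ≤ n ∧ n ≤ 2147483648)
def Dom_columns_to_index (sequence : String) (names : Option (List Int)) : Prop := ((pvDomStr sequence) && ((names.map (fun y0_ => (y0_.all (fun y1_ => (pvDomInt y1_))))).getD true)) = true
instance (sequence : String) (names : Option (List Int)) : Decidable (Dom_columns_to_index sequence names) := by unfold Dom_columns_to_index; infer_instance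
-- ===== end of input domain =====

-- B inverts the control flow: it loops over the names with a gap-skipping column pointer
-- instead of enumerating the sequence with a counter into names; same cost, alternative structure.

-- ===== PORT A =====
-- the 'for column, char in enumerate(sequence)' loop with its 'current' counter and dict
def ctiLoop (names : List Int) : List (Int × Char) → Nat → PySem.Dict Int Int → PySem.Dict Int Int
  | [], _, d => d
  | (col, ch) :: rest, cur, d =>
      if ch ≠ '-' then
        ctiLoop names rest (cur + 1) (d.insert col (PySem.List.pyGetD names (cur : Int) 0))
      else ctiLoop names rest cur d

def columns_to_index (sequence : String) (names : Option (List Int)) : List (Int × Int) :=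
  let size : Int := PySem.Str.len sequence - (PySem.Str.count sequence "-" : Int)
  let names' : List Int := match names with
    | none => PySem.List.pyRange 0 size 1      -- names = range(size)
    | some l => l
  -- the 'raise ValueError' on len(names) != size is excluded by Pre_
  (ctiLoop names' (PySem.List.enumerate sequence.toList) 0 PySem.Dict.empty).items

-- ===== PORT B =====
-- the inner "while sequence[column] == '-': column += 1" (out-of-range indexing would raise
-- in Python; that cannot happen under Pre_, the dite is only a totality guard)
def bSkip (cs : List Char) (col : Nat) : Nat :=
  if h : col < cs.length then (if cs[col] = '-' then bSkip cs (col + 1) else col) else col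
termination_by cs.length - col

-- the "for name in names" loop carrying the column pointer and the dict
def bLoop (cs : List Char) : List Int → Nat → PySem.Dict Int Int → PySem.Dict Int Int
  | [], _, d => d
  | n :: rest, col, d =>
      let c := bSkip cs col
      bLoop cs rest (c + 1) (d.insert (c : Int) n)

def columns_to_index_alt (sequence : String) (names : Option (List Int)) : List (Int × Int) :=
  let size : Int := PySem.Str.len sequence - (PySem.Str.count sequence "-" : Int)
  let names' : List Int := match names with
    | none => PySem.List.pyRange 0 size 1
    | some l => l
  -- the 'raise ValueError' on len(names) != size is excluded by Pre_
  (bLoop sequence.toList names' 0 PySem.Dict.empty).items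

-- ===== PRECONDITION & SPEC =====
-- Pre_ excludes exactly the inputs where A raises ValueError: an explicit names list whose
-- length differs from the number of non-gap characters.
def Pre_columns_to_index (sequence : String) (names : Option (List Int)) : Prop :=
  ∀ l ∈ names, (l.length : Int) = PySem.Str.len sequence - (PySem.Str.count sequence "-" : Int)
instance (sequence : String) (names : Option (List Int)) : Decidable (Pre_columns_to_index sequence names) := by unfold Pre_columns_to_index; infer_instance

def pvWitness_columns_to_index : String × Option (List Int) := ("a-bc-", some [5, 6, 7])

def Spec_columns_to_index (sequence : String) (names : Option (List Int)) (out : List (Int × Int)) : Prop := out = columns_to_index_alt sequence names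
instance (sequence : String) (names : Option (List Int)) (out : List (Int × Int)) : Decidable (Spec_columns_to_index sequence names out) := by unfold Spec_columns_to_index; infer_instance

-- ===== CLAIM (what is proved, stated in full; the proofs are below) =====
def Claim_equal_columns_to_index : Prop := ∀ (sequence : String) (names : Option (List Int)), Dom_columns_to_index sequence names → Pre_columns_to_index sequence names → Spec_columns_to_index sequence names (columns_to_index sequence names)

-- ===== LEMMAS AND PROOFS =====

-- s.count('-') for the single-character pattern '-' is the character count (specific to how
-- both ports use PySem.Str.count)
lemma count_go_singleton : ∀ (fuel : Nat) (l : List Char) (acc : Nat), l.length ≤ fuel →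
    PySem.Chars.count.go ['-'] fuel l acc = acc + l.count '-' := by
  intro fuel
  induction fuel with
  | zero => intro l acc h; cases l with
    | nil => simp [PySem.Chars.count.go]
    | cons c t => simp at h
  | succ n ih =>
    intro l acc h
    cases l with
    | nil => simp [PySem.Chars.count.go]
    | cons c t =>
      rw [PySem.Chars.count.go]
      by_cases hc : c = '-'
      · subst hc
        simp only [List.isPrefixOf, BEq.rfl, Bool.and_self, if_pos]
        simp only [List.length_cons] at h
        rw [ih _ _ (by simpa using h)]
        simp
        omega
      · simp only [List.isPrefixOf]
        have : (('-' : Char) == c) = false := by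
          simp only [beq_eq_false_iff_ne]; exact fun h => hc h.symm
        simp only [this, Bool.false_and, if_neg Bool.false_ne_true]
        rw [ih _ _ (by simp at h; omega)]
        simp [hc]

lemma chars_count_dash (cs : List Char) : PySem.Chars.count cs ['-'] = cs.count '-' := by
  rw [PySem.Chars.count]
  simp only [List.isEmpty_cons, if_neg Bool.false_ne_true]
  simpa using count_go_singleton cs.length cs 0 le_rfl

lemma countP_nonGap (cs : List Char) :
    (cs.countP (fun c => c != '-') : Int) = (cs.length : Int) - (cs.count '-' : Int) := by
  have h := List.length_eq_countP_add_countP (l := cs) (fun c => c == '-')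
  have h2 : cs.count '-' = cs.countP (fun c => c == '-') := List.count_eq_countP
  have h3 : cs.countP (fun a => decide ¬((a == '-') = true)) = cs.countP (fun c => c != '-') := by
    apply List.countP_congr; intro a _; simp [bne]
  omega

-- the whole size expression both ports share is the non-gap count
lemma size_eq (sequence : String) :
    PySem.Str.len sequence - (PySem.Str.count sequence "-" : Int)
      = (sequence.toList.countP (fun c => c != '-') : Int) := by
  rw [PySem.Str.len_eq, PySem.Str.count_eq]
  have : ("-" : String).toList = ['-'] := rfl
  rw [this, chars_count_dash, countP_nonGap]

-- the non-gap column indices at or beyond position col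
def sufCols (cs : List Char) (col : Nat) : List Int :=
  ((PySem.List.enumerate (cs.drop col) (col : Int)).filter (fun p => p.2 != '-')).map (·.1)

lemma sufCols_empty (cs : List Char) (col : Nat) (h : cs.length ≤ col) :
    sufCols cs col = [] := by
  unfold sufCols
  rw [List.drop_eq_nil_of_le h, PySem.List.enumerate_nil]
  rfl

lemma sufCols_step (cs : List Char) (col : Nat) (h : col < cs.length) :
    sufCols cs col
      = if cs[col] != '-' then (col : Int) :: sufCols cs (col + 1) else sufCols cs (col + 1) := by
  unfold sufCols
  rw [List.drop_eq_getElem_cons h, PySem.List.enumerate_cons]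
  rw [List.filter_cons]
  have : ((col : Int) + 1) = ((col + 1 : Nat) : Int) := by push_cast; ring
  rw [this]
  by_cases hc : cs[col] = '-'
  · simp [hc]
  · simp [hc]

lemma bSkip_spec (cs : List Char) : ∀ (fuel col : Nat), cs.length - col ≤ fuel →
    ∀ k rest, sufCols cs col = k :: rest →
      ((bSkip cs col : Int) = k ∧ sufCols cs (bSkip cs col + 1) = rest ∧ col ≤ bSkip cs col) := by
  intro fuel
  induction fuel with
  | zero =>
    intro col h k rest hsc
    rw [sufCols_empty cs col (by omega)] at hsc
    exact absurd hsc (by simp)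
  | succ n ih =>
    intro col h k rest hsc
    by_cases hlt : col < cs.length
    · rw [sufCols_step cs col hlt] at hsc
      by_cases hc : cs[col] = '-'
      · rw [if_neg (by simp [hc])] at hsc
        have := ih (col + 1) (by omega) k rest hsc
        rw [bSkip, dif_pos hlt, if_pos hc]
        exact ⟨this.1, this.2.1, by omega⟩
      · rw [if_pos (by simp [hc])] at hsc
        rw [bSkip, dif_pos hlt, if_neg hc]
        obtain ⟨hk, hrest⟩ : (col : Int) = k ∧ sufCols cs (col + 1) = rest := by
          constructor
          · exact (List.cons.injEq _ _ _ _ ▸ hsc).1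
          · exact (List.cons.injEq _ _ _ _ ▸ hsc).2
        exact ⟨hk, hrest, le_rfl⟩
    · rw [sufCols_empty cs col (by omega)] at hsc
      exact absurd hsc (by simp)

-- loop invariant of B's names-driven loop: starting from a dict whose keys are all below the
-- column pointer, it appends the remaining non-gap columns zipped with the remaining names
lemma bLoop_items (cs : List Char) : ∀ (ns : List Int) (col : Nat) (d : PySem.Dict Int Int),
    ns.length ≤ (sufCols cs col).length →
    (∀ k ∈ d.keys, k < (col : Int)) →
    (bLoop cs ns col d).items = d.items ++ (sufCols cs col).zip ns := by
  intro ns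
  induction ns with
  | nil => intro col d _ _; simp [bLoop]
  | cons n rest ih =>
    intro col d hlen hk
    obtain ⟨k, tail, hsc⟩ : ∃ k tail, sufCols cs col = k :: tail := by
      cases hsc : sufCols cs col with
      | nil => rw [hsc] at hlen; simp at hlen
      | cons a b => exact ⟨a, b, rfl⟩
    obtain ⟨hbk, htail, hcolle⟩ := bSkip_spec cs (cs.length - col) col le_rfl k tail hsc
    rw [bLoop]
    have hcont : d.contains ((bSkip cs col : Nat) : Int) = false := by
      rw [← Bool.not_eq_true, PySem.Dict.contains_iff_mem_keys]
      intro hmem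
      have := hk _ hmem
      have : ((col : Int)) ≤ ((bSkip cs col : Nat) : Int) := by exact_mod_cast hcolle
      omega
    rw [ih (bSkip cs col + 1) _
      (by
        rw [show ((bSkip cs col + 1 : Nat)) = bSkip cs col + 1 from rfl, htail]
        rw [hsc] at hlen; simpa using hlen)
      (by
        intro k' hmem
        rcases (PySem.Dict.mem_keys_insert d _ k' _).mp hmem with h | h
        · subst h; push_cast; omega
        · have := hk k' h
          have : ((col : Int)) ≤ ((bSkip cs col : Nat) : Int) := by exact_mod_cast hcolle
          push_cast; omega)]
    rw [PySem.Dict.items_insert_of_not_contains d _ hcont]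
    rw [hsc, htail, hbk, List.zip_cons_cons]
    simp

-- loop invariant of A's dict-filling loop: starting from a dict whose keys are all < start,
-- it appends exactly the non-gap columns zipped with the names not yet consumed
lemma ctiLoop_items (names : List Int) (cs : List Char) : ∀ (start : Int) (cur : Nat)
    (d : PySem.Dict Int Int),
    (∀ k ∈ d.keys, k < start) →
    cur + cs.countP (fun c => c != '-') ≤ names.length →
    (ctiLoop names (PySem.List.enumerate cs start) cur d).items
      = d.items ++
        ((((PySem.List.enumerate cs start).filter (fun p => p.2 != '-')).map (·.1)).zip
          (names.drop cur)) := by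
  induction cs with
  | nil => intro start cur d hk hlen; simp [PySem.List.enumerate_nil, ctiLoop]
  | cons c t ih =>
    intro start cur d hk hlen
    rw [PySem.List.enumerate_cons]
    by_cases hc : c = '-'
    · subst hc
      rw [ctiLoop, if_neg (by simp)]
      rw [ih (start + 1) cur d (fun k hmem => lt_trans (hk k hmem) (by omega))
        (by simpa [List.countP_cons] using hlen)]
      simp
    · have hne : (c != '-') = true := by simp [hc]
      have hcount : cur < names.length := by
        rw [List.countP_cons, if_pos hne] at hlen; omega
      rw [ctiLoop, if_pos (by simp [hc])]
      have hcont : d.contains start = false := by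
        rw [← Bool.not_eq_true, PySem.Dict.contains_iff_mem_keys]
        intro hmem; exact absurd (hk start hmem) (lt_irrefl start)
      rw [ih (start + 1) (cur + 1) _
        (by
          intro k hmem
          rcases (PySem.Dict.mem_keys_insert d start k _).mp hmem with h | h
          · omega
          · exact lt_trans (hk k h) (by omega))
        (by rw [List.countP_cons, if_pos hne] at hlen; omega)]
      rw [PySem.Dict.items_insert_of_not_contains d _ hcont]
      rw [List.filter_cons, if_pos (by simpa using hne)]
      rw [List.drop_eq_getElem_cons hcount]
      simp only [List.map_cons, List.zip_cons_cons, List.append_assoc, List.singleton_append]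
      congr 2
      rw [PySem.List.pyGetD_natCast, List.getD_eq_getElem names 0 hcount]

-- sufCols from column 0 is A's list of all non-gap columns
lemma sufCols_zero (cs : List Char) :
    sufCols cs 0 = ((PySem.List.enumerate cs).filter (fun p => p.2 != '-')).map (·.1) := by
  unfold sufCols
  simp

lemma length_sufCols_zero (cs : List Char) :
    (sufCols cs 0).length = cs.countP (fun c => c != '-') := by
  rw [sufCols_zero, List.length_map, ← List.countP_eq_length_filter]
  conv_rhs => rw [← PySem.List.map_snd_enumerate cs 0, List.countP_map]
  rfl

-- both ports, specialised to the same name list of the right length, agree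
lemma core_eq (cs : List Char) (ns : List Int)
    (hlen : ns.length = cs.countP (fun c => c != '-')) :
    (ctiLoop ns (PySem.List.enumerate cs) 0 PySem.Dict.empty).items
      = (bLoop cs ns 0 PySem.Dict.empty).items := by
  rw [ctiLoop_items ns cs 0 0 PySem.Dict.empty
    (by rw [PySem.Dict.keys_empty]; simp) (by omega)]
  rw [bLoop_items cs ns 0 PySem.Dict.empty
    (by rw [length_sufCols_zero]; omega)
    (by rw [PySem.Dict.keys_empty]; simp)]
  rw [sufCols_zero, List.drop_zero]

-- ===== VERDICT (by name: the statement is the Claim_ definition above) =====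
theorem columns_to_index_spec : Claim_equal_columns_to_index := by
  intro sequence names _hdom hpre
  show columns_to_index sequence names = columns_to_index_alt sequence names
  simp only [columns_to_index, columns_to_index_alt]
  have hsize := size_eq sequence
  cases names with
  | none =>
    apply core_eq
    rw [PySem.List.length_pyRange_one, hsize]
    simp
  | some l =>
    apply core_eq
    have := hpre l (by simp)
    rw [hsize] at this
    exact_mod_cast this
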